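-- pv_equiv track=rewrite | github.com/corytitus/congress-mcp | congressional-data-mcp/enactai_server_enhanced.py | extract_key_dates
-- ===== SOURCE A (Python) =====
-- def extract_key_dates(actions: list) -> dict:
--     """Extract key dates from bill actions"""
--     dates = {}
--
--     for action in actions:
--         action_text = action.get("text", "").lower()
--         action_date = action.get("actionDate")
--
--         if "introduced" in action_text and "introduced" not in dates:
--             dates["introduced"] = action_date
--         if "referred to" in action_text and "committee" in action_text and "referred_to_committee" not in dates:
--             dates["referred_to_committee"] = action_date
--         if "reported" in action_text and "reported_from_committee" not in dates:
--             dates["reported_from_committee"] = action_date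
--         if "passed house" in action_text and "passed_house" not in dates:
--             dates["passed_house"] = action_date
--         if "passed senate" in action_text and "passed_senate" not in dates:
--             dates["passed_senate"] = action_date
--         if "became law" in action_text and "became_law" not in dates:
--             dates["became_law"] = action_date
--
--     return dates
-- ===== SOURCE B (Python) =====
-- def extract_key_dates(actions: list) -> dict:
--     """Extract key dates from bill actions (table-driven worklist with early exit)."""
--     rules = [
--         ("introduced", ["introduced"]),
--         ("referred_to_committee", ["referred to", "committee"]),
--         ("reported_from_committee", ["reported"]),
--         ("passed_house", ["passed house"]),
--         ("passed_senate", ["passed senate"]),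
--         ("became_law", ["became law"]),
--     ]
--     pending = rules
--     dates = {}
--     for action in actions:
--         if not pending:
--             break
--         text = action.get("text", "").lower()
--         date = action.get("actionDate")
--         hits = [r for r in pending if all(sub in text for sub in r[1])]
--         for key, _subs in hits:
--             dates[key] = date
--         pending = [r for r in pending if not all(sub in text for sub in r[1])]
--     return dates
-- ===== Notes on version B (the rewrite author's own statement) =====
-- stated objective: alternative
-- what changed: Replaces A's six hard-coded guarded ifs per action with a data-driven rule table and a shrinking worklist of pending rules: matched rules are removed from the worklist (so the 'not in dates' membership guards disappear) and the loop exits early once every key has been found.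
import Mathlib
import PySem

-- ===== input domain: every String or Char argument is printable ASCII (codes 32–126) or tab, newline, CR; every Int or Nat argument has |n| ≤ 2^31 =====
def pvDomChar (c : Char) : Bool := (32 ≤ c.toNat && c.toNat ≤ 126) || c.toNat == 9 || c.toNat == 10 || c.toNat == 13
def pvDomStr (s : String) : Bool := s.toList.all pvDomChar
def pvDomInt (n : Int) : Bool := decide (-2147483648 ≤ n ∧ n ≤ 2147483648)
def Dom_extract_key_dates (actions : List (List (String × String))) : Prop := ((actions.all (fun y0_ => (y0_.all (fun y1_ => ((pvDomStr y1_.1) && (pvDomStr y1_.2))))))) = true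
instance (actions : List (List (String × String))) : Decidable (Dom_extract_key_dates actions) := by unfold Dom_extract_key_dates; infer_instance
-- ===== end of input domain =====

-- B replaces A's six hard-coded guarded ifs per action by a rule table with a shrinking
-- worklist of pending rules (early exit when empty); same return value, alternative decomposition.


-- ===== PORT A =====
-- one Python loop iteration: six guarded inserts, first occurrence wins via the "not in dates" checks
def pvStep (d : PySem.Dict String (Option String)) (action : List (String × String)) :
    PySem.Dict String (Option String) :=
  let a := PySem.Dict.ofList action
  let t := PySem.Str.lower (PySem.Dict.getD a "text" "")
  let dt := PySem.Dict.get? a "actionDate"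
  let d1 := if PySem.Str.isIn "introduced" t && !(PySem.Dict.contains d "introduced") then
      PySem.Dict.insert d "introduced" dt else d
  let d2 := if (PySem.Str.isIn "referred to" t && PySem.Str.isIn "committee" t) &&
      !(PySem.Dict.contains d1 "referred_to_committee") then
      PySem.Dict.insert d1 "referred_to_committee" dt else d1
  let d3 := if PySem.Str.isIn "reported" t && !(PySem.Dict.contains d2 "reported_from_committee") then
      PySem.Dict.insert d2 "reported_from_committee" dt else d2
  let d4 := if PySem.Str.isIn "passed house" t && !(PySem.Dict.contains d3 "passed_house") then
      PySem.Dict.insert d3 "passed_house" dt else d3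
  let d5 := if PySem.Str.isIn "passed senate" t && !(PySem.Dict.contains d4 "passed_senate") then
      PySem.Dict.insert d4 "passed_senate" dt else d4
  if PySem.Str.isIn "became law" t && !(PySem.Dict.contains d5 "became_law") then
      PySem.Dict.insert d5 "became_law" dt else d5

def extract_key_dates (actions : List (List (String × String))) : List (String × Option String) :=
  (actions.foldl pvStep PySem.Dict.empty).items

-- ===== PORT B =====
-- a rule matches when every listed substring occurs in the lowercased text
def pvMatches (subs : List String) (t : String) : Bool :=
  subs.all (fun sub => PySem.Str.isIn sub t)

def pvRules : List (String × List String) :=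
  [("introduced", ["introduced"]),
   ("referred_to_committee", ["referred to", "committee"]),
   ("reported_from_committee", ["reported"]),
   ("passed_house", ["passed house"]),
   ("passed_senate", ["passed senate"]),
   ("became_law", ["became law"])]

-- the worklist loop: resolve matched pending rules, drop them, stop when pending is empty
def pvGo : List (List (String × String)) → List (String × List String) →
    PySem.Dict String (Option String) → PySem.Dict String (Option String)
  | [], _, out => out
  | a :: rest, pending, out =>
    match pending with
    | [] => out
    | _ :: _ =>
      let ad := PySem.Dict.ofList a
      let t := PySem.Str.lower (PySem.Dict.getD ad "text" "")
      let dt := PySem.Dict.get? ad "actionDate"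
      let hits := pending.filter (fun r => pvMatches r.2 t)
      let out' := hits.foldl (fun o r => PySem.Dict.insert o r.1 dt) out
      pvGo rest (pending.filter (fun r => !(pvMatches r.2 t))) out'

def extract_key_dates_alt (actions : List (List (String × String))) : List (String × Option String) :=
  (pvGo actions pvRules PySem.Dict.empty).items

-- ===== PRECONDITION & SPEC =====
def Spec_extract_key_dates (actions : List (List (String × String))) (out : List (String × Option String)) : Prop := out = extract_key_dates_alt actions
instance (actions : List (List (String × String))) (out : List (String × Option String)) : Decidable (Spec_extract_key_dates actions out) := by unfold Spec_extract_key_dates; infer_instance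

-- ===== CLAIM (what is proved, stated in full; the proofs are below) =====
def Claim_equal_extract_key_dates : Prop := ∀ (actions : List (List (String × String))), Dom_extract_key_dates actions → Spec_extract_key_dates actions (extract_key_dates actions)

-- ===== LEMMAS AND PROOFS =====

-- A's per-action step, seen as a guarded fold over the rule table
def pvGFold (t : String) (dt : Option String) (rs : List (String × List String))
    (d : PySem.Dict String (Option String)) : PySem.Dict String (Option String) :=
  rs.foldl (fun d r => if pvMatches r.2 t && !(PySem.Dict.contains d r.1) then
    PySem.Dict.insert d r.1 dt else d) d

lemma pvStep_eq (d : PySem.Dict String (Option String)) (a : List (String × String)) :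
    pvStep d a = pvGFold (PySem.Str.lower (PySem.Dict.getD (PySem.Dict.ofList a) "text" ""))
      (PySem.Dict.get? (PySem.Dict.ofList a) "actionDate") pvRules d := by
  simp [pvStep, pvGFold, pvRules, pvMatches, List.foldl]

lemma pvKeyInj : ∀ r ∈ pvRules, ∀ r' ∈ pvRules, r.1 = r'.1 → r = r' := by decide

lemma pvKeysNodup : (pvRules.map Prod.fst).Nodup := by decide

lemma pvContains_foldl (dt : Option String) (H : List (String × List String)) :
    ∀ (d : PySem.Dict String (Option String)) (k : String),
    PySem.Dict.contains (H.foldl (fun o r => PySem.Dict.insert o r.1 dt) d) k =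
      (H.any (fun r => k == r.1) || PySem.Dict.contains d k) := by
  induction H with
  | nil => simp
  | cons r H ih =>
    intro d k
    simp [List.foldl_cons, ih, PySem.Dict.contains_insert, Bool.or_comm, Bool.or_left_comm,
      Bool.or_assoc]

lemma pvGFold_id (t : String) (dt : Option String) :
    ∀ (rs : List (String × List String)) (d : PySem.Dict String (Option String)),
    (∀ r ∈ rs, PySem.Dict.contains d r.1 = true) → pvGFold t dt rs d = d := by
  intro rs
  induction rs with
  | nil => intro d _; rfl
  | cons r rs ih =>
    intro d h
    have hr := h r (by simp)
    simp only [pvGFold, List.foldl_cons, hr, Bool.not_true, Bool.and_false, Bool.false_eq_true,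
      if_false]
    exact ih d (fun r' hr' => h r' (by simp [hr']))

lemma pvGFold_eq (t : String) (dt : Option String) :
    ∀ (rs : List (String × List String)) (d : PySem.Dict String (Option String)),
    (rs.map Prod.fst).Nodup →
    pvGFold t dt rs d =
      (rs.filter (fun r => pvMatches r.2 t && !(PySem.Dict.contains d r.1))).foldl
        (fun o r => PySem.Dict.insert o r.1 dt) d := by
  intro rs
  induction rs with
  | nil => intro d _; rfl
  | cons r rs ih =>
    intro d hnd
    have hnd' : (rs.map Prod.fst).Nodup := by
      simpa using hnd.sublist (by simp [List.map_cons])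
    cases hg : (pvMatches r.2 t && !(PySem.Dict.contains d r.1)) with
    | false =>
      simp only [pvGFold, List.foldl_cons, List.filter_cons, hg, Bool.false_eq_true, if_false]
      simpa only [pvGFold] using ih d hnd'
    | true =>
      simp only [pvGFold, List.foldl_cons, List.filter_cons, hg, if_true, List.foldl_cons]
      have hkeys : ∀ r' ∈ rs, r'.1 ≠ r.1 := by
        intro r' hr' he
        have hnotin : r.1 ∉ rs.map Prod.fst :=
          (List.nodup_cons.mp (by simpa [List.map_cons] using hnd)).1
        exact hnotin (he ▸ List.mem_map_of_mem hr')
      have hfc : rs.filter (fun r' => pvMatches r'.2 t &&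
            !(PySem.Dict.contains (PySem.Dict.insert d r.1 dt) r'.1)) =
          rs.filter (fun r' => pvMatches r'.2 t && !(PySem.Dict.contains d r'.1)) := by
        apply List.filter_congr
        intro r' hr'
        have hne : (r'.1 == r.1) = false := by simpa using hkeys r' hr'
        simp [PySem.Dict.contains_insert, hne]
      rw [← hfc]
      simpa only [pvGFold] using ih (PySem.Dict.insert d r.1 dt) hnd'

lemma pvGo_pending_nil (acts : List (List (String × String)))
    (out : PySem.Dict String (Option String)) : pvGo acts [] out = out := by
  cases acts <;> rfl

lemma pvMain : ∀ (acts : List (List (String × String))) (d : PySem.Dict String (Option String)),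
    pvGo acts (pvRules.filter (fun r => !(PySem.Dict.contains d r.1))) d = acts.foldl pvStep d := by
  intro acts
  induction acts with
  | nil => intro d; rfl
  | cons a rest ih =>
    intro d
    cases hP : pvRules.filter (fun r => !(PySem.Dict.contains d r.1)) with
    | nil =>
      have hall : ∀ r ∈ pvRules, PySem.Dict.contains d r.1 = true := by
        intro r hr
        cases hc : PySem.Dict.contains d r.1 with
        | true => rfl
        | false =>
          exfalso
          have hmem : r ∈ pvRules.filter (fun r => !(PySem.Dict.contains d r.1)) :=
            List.mem_filter.mpr ⟨hr, by simp [hc]⟩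
          rw [hP] at hmem
          simp at hmem
      have hstep : pvStep d a = d := by
        rw [pvStep_eq]; exact pvGFold_id _ _ pvRules d hall
      have hfold : (a :: rest).foldl pvStep d = rest.foldl pvStep d := by
        rw [List.foldl_cons, hstep]
      rw [hfold, ← ih d, hP, pvGo_pending_nil, pvGo_pending_nil]
    | cons p ps =>
      set t := PySem.Str.lower (PySem.Dict.getD (PySem.Dict.ofList a) "text" "") with ht
      set dt := PySem.Dict.get? (PySem.Dict.ofList a) "actionDate" with hdt
      have hgo : pvGo (a :: rest) (p :: ps) d =
          pvGo rest ((p :: ps).filter (fun r => !(pvMatches r.2 t)))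
            (((p :: ps).filter (fun r => pvMatches r.2 t)).foldl
              (fun o r => PySem.Dict.insert o r.1 dt) d) := rfl
      set d' := ((p :: ps).filter (fun r => pvMatches r.2 t)).foldl
          (fun o r => PySem.Dict.insert o r.1 dt) d with hd'
      have hstep : pvStep d a = d' := by
        rw [pvStep_eq, pvGFold_eq t dt pvRules d pvKeysNodup, ← List.filter_filter, hP]
      have hcont : ∀ r ∈ pvRules, PySem.Dict.contains d' r.1 =
          (PySem.Dict.contains d r.1 || pvMatches r.2 t) := by
        intro r hr
        rw [hd', pvContains_foldl]
        cases hc : PySem.Dict.contains d r.1 with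
        | true => simp
        | false =>
          have hrP : r ∈ p :: ps := by
            rw [← hP]; exact List.mem_filter.mpr ⟨hr, by simp [hc]⟩
          cases hm : pvMatches r.2 t with
          | true =>
            have hany : ((p :: ps).filter (fun r' => pvMatches r'.2 t)).any
                (fun r' => r.1 == r'.1) = true :=
              List.any_eq_true.mpr ⟨r, List.mem_filter.mpr ⟨hrP, hm⟩, by simp⟩
            simp [hany]
          | false =>
            have hany : ((p :: ps).filter (fun r' => pvMatches r'.2 t)).any
                (fun r' => r.1 == r'.1) = false := by
              apply List.any_eq_false.mpr
              intro r' hr'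
              obtain ⟨hr'P, hm''⟩ := List.mem_filter.mp hr'
              have hr'R : r' ∈ pvRules := (List.mem_filter.mp (hP ▸ hr'P)).1
              intro hbeq
              have hrr : r = r' := pvKeyInj r hr r' hr'R (by simpa using hbeq)
              rw [← hrr] at hm''
              simp [hm] at hm''
            simp [hany]
      have hpend : (p :: ps).filter (fun r => !(pvMatches r.2 t)) =
          pvRules.filter (fun r => !(PySem.Dict.contains d' r.1)) := by
        rw [← hP, List.filter_filter]
        apply List.filter_congr
        intro r hr
        rw [hcont r hr]
        cases hc : PySem.Dict.contains d r.1 <;> cases hm : pvMatches r.2 t <;> simp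
      rw [List.foldl_cons, hstep, ← ih d', hgo, hpend]

-- ===== VERDICT (by name: the statement is the Claim_ definition above) =====
theorem extract_key_dates_spec : Claim_equal_extract_key_dates := by
  intro actions _
  unfold Spec_extract_key_dates extract_key_dates extract_key_dates_alt
  have h0 : pvRules.filter
      (fun r => !(PySem.Dict.contains (PySem.Dict.empty : PySem.Dict String (Option String)) r.1))
      = pvRules := by decide
  rw [← h0, pvMain]
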